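-- pv_equiv track=rewrite | github.com/skyoxu/sanguo | scripts/python/hardcode_demo_paths_in_tasks.py | _paths_for_task_id
-- ===== SOURCE A (Python) =====
-- from typing import Any, Dict, List
--
-- DEMO_ROOT = r"C:\buildgame\godotdemo\demo\godot-demo-projects"
--
-- DAFUWENG_ROOT = r"C:\buildgame\godotdemo\dafuweng"
--
-- HOWTOUSE_MD = DEMO_ROOT + r"\howtouse.md"
--
-- def _paths_for_task_id(tid: int) -> List[str]:
--     """
--     Decide which external demo paths are most relevant for a given task id.
--     This uses the three learning modules from taskup.md as the main spine.
--     """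
--     paths: List[str] = []
--
--     # Module 1: board / city / ring route.
--     module1_ids = {2, 3, 10, 23}
--     # Module 2: turn loop + calendar.
--     module2_ids = {6, 17, 21}
--     # Module 3: economy / environment events.
--     module3_ids = {7, 8, 12, 13, 14, 15, 16, 19, 24}
--
--     if tid in module1_ids:
--         paths.extend(
--             [
--                 DEMO_ROOT + r"\2d\hexagonal_map",
--                 DEMO_ROOT + r"\2d\dynamic_tilemap_layers",
--                 DAFUWENG_ROOT + r"\monopoly_clone",
--             ]
--         )
--
--     if tid in module2_ids:
--         paths.extend(
--             [
--                 DAFUWENG_ROOT + r"\Prototype",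
--                 DAFUWENG_ROOT + r"\casus-belli",
--                 DEMO_ROOT + r"\2d\pong",
--             ]
--         )
--
--     if tid in module3_ids:
--         paths.extend(
--             [
--                 DAFUWENG_ROOT + r"\monopoly_clone",
--                 DAFUWENG_ROOT + r"\Prototype",
--             ]
--         )
--
--     # AI-related tasks.
--     if tid in {11, 25}:
--         paths.extend(
--             [
--                 DEMO_ROOT + r"\2d\finite_state_machine",
--                 DAFUWENG_ROOT + r"\Prototype",
--             ]
--         )
--
--     # UI-related tasks.
--     if tid in {9, 19, 20, 21, 22, 23, 24}:
--         paths.extend(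
--             [
--                 DEMO_ROOT + r"\gui\control_gallery",
--                 DEMO_ROOT + r"\gui\accessibility",
--             ]
--         )
--
--     # Help / tutorial.
--     if tid == 30:
--         paths.append(HOWTOUSE_MD)
--
--     # Bootstrap / architecture might benefit from casus-belli layout.
--     if tid == 1:
--         paths.append(DAFUWENG_ROOT + r"\casus-belli")
--
--     # Deduplicate while preserving order.
--     seen = set()
--     unique_paths: List[str] = []
--     for p in paths:
--         if p not in seen:
--             seen.add(p)
--             unique_paths.append(p)
--     return unique_paths
-- ===== SOURCE B (Python) =====
-- from typing import Dict, List, Tuple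
--
-- DEMO_ROOT = r"C:\buildgame\godotdemo\demo\godot-demo-projects"
-- DAFUWENG_ROOT = r"C:\buildgame\godotdemo\dafuweng"
-- HOWTOUSE_MD = DEMO_ROOT + r"\howtouse.md"
--
--
-- def _build_table() -> Dict[int, Tuple[str, ...]]:
--     """Invert the rule list once, at import time: task id -> its deduped paths."""
--     rules = [
--         ((2, 3, 10, 23),
--          (DEMO_ROOT + r"\2d\hexagonal_map",
--           DEMO_ROOT + r"\2d\dynamic_tilemap_layers",
--           DAFUWENG_ROOT + r"\monopoly_clone")),
--         ((6, 17, 21),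
--          (DAFUWENG_ROOT + r"\Prototype",
--           DAFUWENG_ROOT + r"\casus-belli",
--           DEMO_ROOT + r"\2d\pong")),
--         ((7, 8, 12, 13, 14, 15, 16, 19, 24),
--          (DAFUWENG_ROOT + r"\monopoly_clone",
--           DAFUWENG_ROOT + r"\Prototype")),
--         ((11, 25),
--          (DEMO_ROOT + r"\2d\finite_state_machine",
--           DAFUWENG_ROOT + r"\Prototype")),
--         ((9, 19, 20, 21, 22, 23, 24),
--          (DEMO_ROOT + r"\gui\control_gallery",
--           DEMO_ROOT + r"\gui\accessibility")),
--         ((30,), (HOWTOUSE_MD,)),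
--         ((1,), (DAFUWENG_ROOT + r"\casus-belli",)),
--     ]
--     table: Dict[int, Tuple[str, ...]] = {}
--     for tids, ps in rules:
--         for t in tids:
--             table[t] = table.get(t, ()) + ps
--     return {t: tuple(dict.fromkeys(ps)) for t, ps in table.items()}
--
--
-- _TABLE = _build_table()
--
--
-- def _paths_for_task_id(tid: int) -> List[str]:
--     return list(_TABLE.get(tid, ()))
-- ===== Notes on version B (the rewrite author's own statement) =====
-- stated objective: alternative
-- what changed: Inverts the rule list once at import time into a precomputed dict keyed by task id with already-deduplicated path tuples, so the function itself is a single dict lookup instead of eight membership tests followed by a dedup loop.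
import Mathlib
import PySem

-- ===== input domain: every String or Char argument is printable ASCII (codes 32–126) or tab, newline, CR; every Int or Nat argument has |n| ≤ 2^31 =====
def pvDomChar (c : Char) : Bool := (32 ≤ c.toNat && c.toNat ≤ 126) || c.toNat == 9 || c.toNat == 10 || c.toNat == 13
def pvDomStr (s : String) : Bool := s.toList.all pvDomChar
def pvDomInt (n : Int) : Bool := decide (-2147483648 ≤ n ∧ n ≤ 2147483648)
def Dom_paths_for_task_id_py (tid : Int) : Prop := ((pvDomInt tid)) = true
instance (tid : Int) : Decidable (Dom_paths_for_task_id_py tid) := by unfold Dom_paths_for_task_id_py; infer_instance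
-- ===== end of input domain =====

-- B inverts the rule list once into a precomputed id -> deduped-paths dict, so the
-- function itself is a single dict lookup (objective: alternative data structure).

-- ===== PORT A =====
def pvDEMO_ROOT : String := "C:\\buildgame\\godotdemo\\demo\\godot-demo-projects"
def pvDAFUWENG_ROOT : String := "C:\\buildgame\\godotdemo\\dafuweng"
def pvHOWTOUSE_MD : String := pvDEMO_ROOT ++ "\\howtouse.md"

def paths_for_task_id_py (tid : Int) : List String :=
  let paths : List String := []
  let module1_ids : PySem.Set Int := PySem.Set.ofList [2, 3, 10, 23]
  let module2_ids : PySem.Set Int := PySem.Set.ofList [6, 17, 21]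
  let module3_ids : PySem.Set Int := PySem.Set.ofList [7, 8, 12, 13, 14, 15, 16, 19, 24]
  let paths := if PySem.Set.contains module1_ids tid then
      paths ++ [pvDEMO_ROOT ++ "\\2d\\hexagonal_map",
                pvDEMO_ROOT ++ "\\2d\\dynamic_tilemap_layers",
                pvDAFUWENG_ROOT ++ "\\monopoly_clone"]
    else paths
  let paths := if PySem.Set.contains module2_ids tid then
      paths ++ [pvDAFUWENG_ROOT ++ "\\Prototype",
                pvDAFUWENG_ROOT ++ "\\casus-belli",
                pvDEMO_ROOT ++ "\\2d\\pong"]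
    else paths
  let paths := if PySem.Set.contains module3_ids tid then
      paths ++ [pvDAFUWENG_ROOT ++ "\\monopoly_clone",
                pvDAFUWENG_ROOT ++ "\\Prototype"]
    else paths
  let paths := if PySem.Set.contains (PySem.Set.ofList [11, 25]) tid then
      paths ++ [pvDEMO_ROOT ++ "\\2d\\finite_state_machine",
                pvDAFUWENG_ROOT ++ "\\Prototype"]
    else paths
  let paths := if PySem.Set.contains (PySem.Set.ofList [9, 19, 20, 21, 22, 23, 24]) tid then
      paths ++ [pvDEMO_ROOT ++ "\\gui\\control_gallery",
                pvDEMO_ROOT ++ "\\gui\\accessibility"]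
    else paths
  let paths := if tid == 30 then paths ++ [pvHOWTOUSE_MD] else paths
  let paths := if tid == 1 then paths ++ [pvDAFUWENG_ROOT ++ "\\casus-belli"] else paths
  -- the dedup loop: seen is a Python set, unique_paths the output list
  (paths.foldl
    (fun (st : PySem.Set String × List String) p =>
      if PySem.Set.contains st.1 p then st
      else (PySem.Set.add st.1 p, st.2 ++ [p]))
    (PySem.Set.empty, [])).2

-- ===== PORT B =====
-- the rule list inside _build_table, in source order
def pvRulesB : List (List Int × List String) :=
  [([2, 3, 10, 23],
    [pvDEMO_ROOT ++ "\\2d\\hexagonal_map",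
     pvDEMO_ROOT ++ "\\2d\\dynamic_tilemap_layers",
     pvDAFUWENG_ROOT ++ "\\monopoly_clone"]),
   ([6, 17, 21],
    [pvDAFUWENG_ROOT ++ "\\Prototype",
     pvDAFUWENG_ROOT ++ "\\casus-belli",
     pvDEMO_ROOT ++ "\\2d\\pong"]),
   ([7, 8, 12, 13, 14, 15, 16, 19, 24],
    [pvDAFUWENG_ROOT ++ "\\monopoly_clone",
     pvDAFUWENG_ROOT ++ "\\Prototype"]),
   ([11, 25],
    [pvDEMO_ROOT ++ "\\2d\\finite_state_machine",
     pvDAFUWENG_ROOT ++ "\\Prototype"]),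
   ([9, 19, 20, 21, 22, 23, 24],
    [pvDEMO_ROOT ++ "\\gui\\control_gallery",
     pvDEMO_ROOT ++ "\\gui\\accessibility"]),
   ([30], [pvHOWTOUSE_MD]),
   ([1], [pvDAFUWENG_ROOT ++ "\\casus-belli"])]

-- _build_table: the nested accumulation loop, then the dedup-each-value comprehension
def pvTable : PySem.Dict Int (List String) :=
  let raw := pvRulesB.foldl
    (fun table r =>
      r.1.foldl (fun (table : PySem.Dict Int (List String)) t =>
        table.insert t (table.getD t [] ++ r.2)) table)
    PySem.Dict.empty
  PySem.Dict.mk (raw.items.map (fun p => (p.1, PySem.List.dedup p.2)))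

def paths_for_task_id_py_alt (tid : Int) : List String :=
  pvTable.getD tid []

-- ===== PRECONDITION & SPEC =====
def Spec_paths_for_task_id_py (tid : Int) (out : List String) : Prop := out = paths_for_task_id_py_alt tid
instance (tid : Int) (out : List String) : Decidable (Spec_paths_for_task_id_py tid out) := by unfold Spec_paths_for_task_id_py; infer_instance

-- ===== CLAIM (what is proved, stated in full; the proofs are below) =====
def Claim_equal_paths_for_task_id_py : Prop := ∀ (tid : Int), Dom_paths_for_task_id_py tid → Spec_paths_for_task_id_py tid (paths_for_task_id_py tid)

-- ===== LEMMAS AND PROOFS =====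

-- the ids that occur in any rule / any branch of A
def pvRelevant : List Int :=
  [1, 2, 3, 6, 7, 8, 9, 10, 11, 12, 13, 14, 15, 16, 17, 19, 20, 21, 22, 23, 24, 25, 30]

theorem pv_alt_irrelevant (tid : Int) (h : tid ∉ pvRelevant) :
    paths_for_task_id_py_alt tid = [] := by
  simp only [pvRelevant, List.mem_cons, List.not_mem_nil, or_false, not_or] at h
  have hk : pvTable.keys =
      [2, 3, 10, 23, 6, 17, 21, 7, 8, 12, 13, 14, 15, 16, 19, 24, 11, 25, 9, 20, 22, 30, 1] := by
    rfl
  unfold paths_for_task_id_py_alt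
  rw [PySem.Dict.getD_of_not_contains]
  rw [PySem.Dict.contains_eq_decide_mem_keys, hk]
  simp only [List.mem_cons, List.not_mem_nil, or_false, decide_eq_false_iff_not, not_or]
  omega

theorem pv_a_irrelevant (tid : Int) (h : tid ∉ pvRelevant) :
    paths_for_task_id_py tid = [] := by
  simp only [pvRelevant, List.mem_cons, List.not_mem_nil, or_false, not_or] at h
  obtain ⟨h1, h2, h3, h6, h7, h8, h9, h10, h11, h12, h13, h14, h15, h16, h17, h19, h20,
    h21, h22, h23, h24, h25, h30⟩ := h
  have e1 : PySem.Set.ofList ([2, 3, 10, 23] : List Int) = [2, 3, 10, 23] := by decide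
  have e2 : PySem.Set.ofList ([6, 17, 21] : List Int) = [6, 17, 21] := by decide
  have e3 : PySem.Set.ofList ([7, 8, 12, 13, 14, 15, 16, 19, 24] : List Int)
      = [7, 8, 12, 13, 14, 15, 16, 19, 24] := by decide
  have e4 : PySem.Set.ofList ([11, 25] : List Int) = [11, 25] := by decide
  have e5 : PySem.Set.ofList ([9, 19, 20, 21, 22, 23, 24] : List Int)
      = [9, 19, 20, 21, 22, 23, 24] := by decide
  unfold paths_for_task_id_py
  simp [e1, e2, e3, e4, e5, PySem.Set.contains_eq_listContains,
    h1, h2, h3, h6, h7, h8, h9, h10, h11, h12, h13, h14, h15, h16, h17, h19, h20,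
    h21, h22, h23, h24, h25, h30]

-- ===== VERDICT (by name: the statement is the Claim_ definition above) =====
theorem paths_for_task_id_py_spec : Claim_equal_paths_for_task_id_py := by
  intro tid _
  unfold Spec_paths_for_task_id_py
  by_cases h : tid ∈ pvRelevant
  · fin_cases h <;> rfl
  · rw [pv_a_irrelevant tid h, pv_alt_irrelevant tid h]
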